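-- pv_equiv track=rewrite | github.com/shutpa01/cryptic_solver_v2 | stages/compound.py | solve_deletion
-- ===== SOURCE A (Python) =====
-- from typing import List, Dict, Any, Optional, Tuple, Set
--
-- def solve_deletion(base_letters: str, delete_letters: str,
--                    answer: str) -> Optional[Dict[str, Any]]:
--     """
--     Solve deletion: remove delete_letters from base_letters.
--     """
--     base_upper = base_letters.upper()
--     delete_upper = delete_letters.upper()
--     answer_upper = answer.upper().replace(' ', '')
--
--     # Try removing the delete letters
--     remaining = base_upper
--     for c in delete_upper:
--         idx = remaining.find(c)
--         if idx >= 0: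
--             remaining = remaining[:idx] + remaining[idx + 1:]
--
--     if sorted(remaining) == sorted(answer_upper):
--         return {
--             'operation': 'deletion',
--             'base': base_letters,
--             'deleted': delete_letters,
--             'result': answer
--         }
--
--     return None
-- ===== SOURCE B (Python) =====
-- def solve_deletion(base_letters: str, delete_letters: str, answer: str):
--     """
--     Solve deletion: remove delete_letters from base_letters.
--     Sort base and delete letters once, then drop the matched delete
--     letters in a single two-pointer merge pass; compare the already
--     sorted remainder with the sorted answer.
--     """
--     base_upper = base_letters.upper()
--     delete_upper = delete_letters.upper()
--     answer_upper = answer.upper().replace(' ', '')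
--
--     b = sorted(base_upper)
--     d = sorted(delete_upper)
--     remaining = []
--     i = j = 0
--     while i < len(b) and j < len(d):
--         if b[i] < d[j]:
--             remaining.append(b[i])
--             i += 1
--         elif b[i] == d[j]:
--             i += 1
--             j += 1
--         else:
--             j += 1
--     remaining.extend(b[i:])
--
--     if remaining == sorted(answer_upper):
--         return {
--             'operation': 'deletion',
--             'base': base_letters,
--             'deleted': delete_letters,
--             'result': answer
--         }
--     return None
-- ===== Notes on version B (the rewrite author's own statement) =====
-- stated objective: faster
-- what changed: A deletes letters by repeated string find+slice (quadratic string copying) and sorts the remainder at the end; B sorts base and delete letters up front and removes the matched delete letters in one two-pointer merge pass over the two sorted lists, comparing the already-sorted remainder with the sorted answer.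
import Mathlib
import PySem

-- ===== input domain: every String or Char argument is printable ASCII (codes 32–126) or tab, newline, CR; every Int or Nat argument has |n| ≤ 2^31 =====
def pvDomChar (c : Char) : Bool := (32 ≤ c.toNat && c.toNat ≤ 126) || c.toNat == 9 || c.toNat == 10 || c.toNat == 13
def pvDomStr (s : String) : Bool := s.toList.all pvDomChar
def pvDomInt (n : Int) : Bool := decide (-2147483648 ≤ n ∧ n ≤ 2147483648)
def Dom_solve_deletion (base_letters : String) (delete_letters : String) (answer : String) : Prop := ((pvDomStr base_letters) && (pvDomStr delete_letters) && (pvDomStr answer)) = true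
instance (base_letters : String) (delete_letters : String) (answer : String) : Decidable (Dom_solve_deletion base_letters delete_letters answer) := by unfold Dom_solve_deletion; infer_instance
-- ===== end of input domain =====

-- ===== PORT A =====
-- B removes the delete letters in one two-pointer merge over pre-sorted lists instead of A's repeated find+slice followed by a final sort (objective: faster, measured; return value only, no side effects).
def solve_deletion (base_letters : String) (delete_letters : String) (answer : String) : Option (List (String × String)) :=
  let base_upper := PySem.Chars.upper base_letters.toList
  let delete_upper := PySem.Chars.upper delete_letters.toList
  let answer_upper := PySem.Chars.replace (PySem.Chars.upper answer.toList) [' '] []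
  let remaining := delete_upper.foldl (fun remaining c =>
      let idx := PySem.Chars.find remaining [c]
      if 0 ≤ idx then
        PySem.List.slice remaining (some 0) (some idx) ++ PySem.List.slice remaining (some (idx + 1)) none
      else remaining) base_upper
  if PySem.List.sorted remaining (fun x => x) false = PySem.List.sorted answer_upper (fun x => x) false then
    some [("operation", "deletion"), ("base", base_letters), ("deleted", delete_letters), ("result", answer)]
  else
    none

-- ===== PORT B =====
-- the two-pointer merge loop of Source B: drop one sorted-base letter per matching sorted-delete letter; on loop exit ('| b, [] => b') the rest of b is kept (Source B's 'remaining.extend(b[i:])')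
def pvMergeRemove : List Char → List Char → List Char
  | b, [] => b
  | [], _ :: _ => []
  | x :: b, c :: d =>
      if x < c then x :: pvMergeRemove b (c :: d)
      else if x = c then pvMergeRemove b d
      else pvMergeRemove (x :: b) d

def solve_deletion_alt (base_letters : String) (delete_letters : String) (answer : String) : Option (List (String × String)) :=
  let base_upper := PySem.Chars.upper base_letters.toList
  let delete_upper := PySem.Chars.upper delete_letters.toList
  let answer_upper := PySem.Chars.replace (PySem.Chars.upper answer.toList) [' '] []
  let b := PySem.List.sorted base_upper (fun x => x) false
  let d := PySem.List.sorted delete_upper (fun x => x) false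
  let remaining := pvMergeRemove b d
  if remaining = PySem.List.sorted answer_upper (fun x => x) false then
    some [("operation", "deletion"), ("base", base_letters), ("deleted", delete_letters), ("result", answer)]
  else
    none

-- ===== PRECONDITION & SPEC =====
def Spec_solve_deletion (base_letters : String) (delete_letters : String) (answer : String) (out : Option (List (String × String))) : Prop := out = solve_deletion_alt base_letters delete_letters answer
instance (base_letters : String) (delete_letters : String) (answer : String) (out : Option (List (String × String))) : Decidable (Spec_solve_deletion base_letters delete_letters answer out) := by unfold Spec_solve_deletion; infer_instance

-- ===== CLAIM (what is proved, stated in full; the proofs are below) =====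
def Claim_equal_solve_deletion : Prop := ∀ (base_letters : String) (delete_letters : String) (answer : String), Dom_solve_deletion base_letters delete_letters answer → Spec_solve_deletion base_letters delete_letters answer (solve_deletion base_letters delete_letters answer)

-- ===== LEMMAS AND PROOFS =====

-- A's per-letter step (find + two slices) is List.erase
lemma pvStepA_eq_erase (rem : List Char) (c : Char) :
    (if 0 ≤ PySem.Chars.find rem [c] then
        PySem.List.slice rem (some 0) (some (PySem.Chars.find rem [c])) ++
          PySem.List.slice rem (some (PySem.Chars.find rem [c] + 1)) none
      else rem) = rem.erase c := by
  by_cases hmem : c ∈ rem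
  · have hnn : 0 ≤ PySem.Chars.find rem [c] :=
      (PySem.Chars.find_nonneg_iff _ _).mpr ((List.singleton_infix_iff _ _).mpr hmem)
    rw [if_pos hnn]
    obtain ⟨hpre, hmin⟩ := PySem.Chars.find_spec hnn
    set n := (PySem.Chars.find rem [c]).toNat with hn
    have hfind : PySem.Chars.find rem [c] = (n : Int) := (Int.toNat_of_nonneg hnn).symm
    obtain ⟨t, ht⟩ := hpre
    have hdropn : rem.drop n = c :: t := by simpa using ht.symm
    have hdropn1 : rem.drop (n + 1) = t := by
      have h := congrArg List.tail hdropn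
      simpa [List.tail_drop] using h
    have hnotmem : c ∉ rem.take n := by
      intro hc
      obtain ⟨i, hi, hgi⟩ := List.getElem_of_mem hc
      have hin : i < n := lt_of_lt_of_le hi (by simp [List.length_take])
      have hil : i < rem.length := by
        have := hi
        simp [List.length_take] at this
        omega
      refine hmin i hin ⟨rem.drop (i + 1), ?_⟩
      rw [List.drop_eq_getElem_cons hil]
      simp only [List.singleton_append]
      congr 1
      rw [← hgi]
      simp [List.getElem_take]
    rw [hfind]
    have hcast : ((n : Int) + 1) = (((n + 1 : Nat) : Int)) := by push_cast; ring
    rw [hcast, PySem.List.slice_from_natCast]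
    simp only [PySem.List.slice_zero_start, PySem.List.slice_to_natCast]
    conv_rhs => rw [show rem = rem.take n ++ rem.drop n from (List.take_append_drop n rem).symm]
    rw [hdropn, List.erase_append_right _ (by simpa using hnotmem), List.erase_cons_head, hdropn1]
  · have h1 : PySem.Chars.find rem [c] = -1 :=
      (PySem.Chars.find_eq_neg_one_iff _ _).mpr (fun h => hmem ((List.singleton_infix_iff _ _).mp h))
    rw [h1, if_neg (by norm_num)]
    exact (List.erase_of_not_mem hmem).symm

lemma pvMergeRemove_mem (b d : List Char) (y : Char) (h : y ∈ pvMergeRemove b d) : y ∈ b := by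
  induction b, d using pvMergeRemove.induct with
  | case1 b => simpa [pvMergeRemove] using h
  | case2 c d => simp [pvMergeRemove] at h
  | case3 x b c d hlt ih =>
      rw [pvMergeRemove, if_pos hlt] at h
      rcases List.mem_cons.mp h with h | h
      · simp [h]
      · exact List.mem_cons_of_mem _ (ih h)
  | case4 b c d hlt ih =>
      rw [pvMergeRemove, if_neg hlt, if_pos rfl] at h
      exact List.mem_cons_of_mem _ (ih h)
  | case5 x b c d hlt hne ih =>
      rw [pvMergeRemove, if_neg hlt, if_neg hne] at h
      exact ih h

lemma pvMergeRemove_pairwise {b d : List Char}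
    (hb : b.Pairwise (· ≤ ·)) (hd : d.Pairwise (· ≤ ·)) :
    (pvMergeRemove b d).Pairwise (fun a b => a ≤ b) := by
  induction b, d using pvMergeRemove.induct with
  | case1 b => simpa [pvMergeRemove] using hb
  | case2 c d => simp [pvMergeRemove]
  | case3 x b c d hlt ih =>
      rw [pvMergeRemove, if_pos hlt]
      rcases List.pairwise_cons.mp hb with ⟨hxb, hb'⟩
      refine List.pairwise_cons.mpr ⟨?_, ih hb' hd⟩
      intro y hy
      exact hxb y (pvMergeRemove_mem _ _ _ hy)
  | case4 b c d hlt ih =>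
      rw [pvMergeRemove, if_neg hlt, if_pos rfl]
      exact ih (List.pairwise_cons.mp hb).2 (List.pairwise_cons.mp hd).2
  | case5 x b c d hlt hne ih =>
      rw [pvMergeRemove, if_neg hlt, if_neg hne]
      exact ih hb (List.pairwise_cons.mp hd).2

-- the merge's multiplicities: clamped multiset subtraction
lemma pvMergeRemove_count (b d : List Char)
    (hb : b.Pairwise (· ≤ ·)) (hd : d.Pairwise (· ≤ ·)) (a : Char) :
    (pvMergeRemove b d).count a = b.count a - d.count a := by
  induction b, d using pvMergeRemove.induct with
  | case1 b => simp [pvMergeRemove]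
  | case2 c d => simp [pvMergeRemove]
  | case3 x b c d hlt ih =>
      rw [pvMergeRemove, if_pos hlt]
      rcases List.pairwise_cons.mp hb with ⟨hxb, hb'⟩
      have hxcd : x ∉ (c :: d) := by
        intro hmemx
        rcases List.mem_cons.mp hmemx with h | h
        · exact absurd (h ▸ hlt) (lt_irrefl _)
        · exact absurd (lt_of_lt_of_le hlt ((List.pairwise_cons.mp hd).1 x h)) (lt_irrefl _)
      by_cases hax : a = x
      · subst hax
        have h0 : (c :: d).count a = 0 := List.count_eq_zero.mpr hxcd
        simp only [List.count_cons_self, ih hb' hd, h0]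
        omega
      · simp only [List.count_cons_of_ne (Ne.symm hax), ih hb' hd]
  | case4 b c d hlt ih =>
      rw [pvMergeRemove, if_neg hlt, if_pos rfl]
      rw [ih (List.pairwise_cons.mp hb).2 (List.pairwise_cons.mp hd).2]
      by_cases hac : a = c
      · subst hac; simp only [List.count_cons_self]; omega
      · simp only [List.count_cons_of_ne (Ne.symm hac)]
  | case5 x b c d hlt hne ih =>
      rw [pvMergeRemove, if_neg hlt, if_neg hne]
      rw [ih hb (List.pairwise_cons.mp hd).2]
      have hcx : c < x := lt_of_le_of_ne (le_of_not_gt hlt) (fun h => hne h.symm)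
      by_cases hac : a = c
      · subst hac
        have h0 : (x :: b).count a = 0 := by
          refine List.count_eq_zero.mpr ?_
          intro hmemc
          rcases List.mem_cons.mp hmemc with h | h
          · exact absurd (h ▸ hcx) (lt_irrefl _)
          · exact absurd (lt_of_lt_of_le hcx ((List.pairwise_cons.mp hb).1 a h)) (lt_irrefl _)
        simp only [h0, List.count_cons_self]
        omega
      · simp only [List.count_cons_of_ne (Ne.symm hac)]

lemma pvSorted_pairwise_le (xs : List Char) :
    (PySem.List.sorted xs (fun x => x) false).Pairwise (· ≤ ·) := by
  have := PySem.List.sorted_pairwise (xs := xs) (key := fun x => x)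
  simpa using this

-- the heart: sorted(A's remaining) IS B's merged remainder
lemma pvKey (b d : List Char) :
    PySem.List.sorted (d.foldl List.erase b) (fun x => x) false =
      pvMergeRemove (PySem.List.sorted b (fun x => x) false) (PySem.List.sorted d (fun x => x) false) := by
  apply PySem.List.sorted_id_eq_of_perm_of_pairwise
  · apply List.perm_iff_count.mpr
    intro a
    rw [pvMergeRemove_count _ _ (pvSorted_pairwise_le b) (pvSorted_pairwise_le d) a,
      (PySem.List.sorted_perm (xs := b) (key := fun x => x) (rev := false)).count_eq a,
      (PySem.List.sorted_perm (xs := d) (key := fun x => x) (rev := false)).count_eq a,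
      ← List.diff_eq_foldl, List.count_diff]
  · exact pvMergeRemove_pairwise (pvSorted_pairwise_le b) (pvSorted_pairwise_le d)

-- ===== VERDICT (by name: the statement is the Claim_ definition above) =====
theorem solve_deletion_spec : Claim_equal_solve_deletion := by
  intro base_letters delete_letters answer _
  unfold Spec_solve_deletion solve_deletion solve_deletion_alt
  simp only []
  have hloop : ∀ (base : List Char) (del : List Char),
      del.foldl (fun remaining c =>
        let idx := PySem.Chars.find remaining [c]
        if 0 ≤ idx then
          PySem.List.slice remaining (some 0) (some idx) ++
            PySem.List.slice remaining (some (idx + 1)) none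
        else remaining) base = del.foldl List.erase base := by
    intro base del
    apply PySem.List.foldl_congr_mem
    intro acc c _
    simpa using pvStepA_eq_erase acc c
  rw [hloop, pvKey]
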